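-- pv_equiv track=rewrite | github.com/gvaler/Git_Project | HW2.py | sortDigitsByAction
-- ===== SOURCE A (Python) =====
-- import collections
-- import collections
--
-- def sortDigitsByAction(lst,action):
--     """
--     The function sorts list by user action
--     :param lst: list of numbers
--     :param action: action for execution
--     :return: sorted lst desc/asc by action
--     """
--     new_list, res, temp = [],[],0        # create variables
--
--     # dividing numbers to digits
--     for v in lst:
--         while (v > 0):
--             new_list.append(v % 10)
--             v = int(v / 10)
--
--     d = collections.Counter(new_list)     # create dictionary from array with digits
--     new_list.clear()                      # clean the list for continue
--
--     # add all digits to array without duplicates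
--     for k, v in d.items():
--         new_list.append(int(k))
--
--     # sort by asc\desc have 2 cases only
--     # action can be asc or desc
--     if action=="asc":
--         return sorted(new_list,reverse=False)
--     else:
--         return sorted(new_list,reverse=True)
-- ===== SOURCE B (Python) =====
-- def sortDigitsByAction(lst, action):
--     # presence table over the fixed digit domain 0..9 instead of Counter + comparison sort
--     present = [False] * 10
--     for v in lst:
--         while v > 0:
--             present[v % 10] = True
--             v = int(v / 10)
--     if action == "asc":
--         return [i for i in range(10) if present[i]]
--     else:
--         return [i for i in range(9, -1, -1) if present[i]]
-- ===== Notes on version B (the rewrite author's own statement) =====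
-- stated objective: simpler
-- what changed: Replaces the digit list + Counter dedup + comparison sort with a 10-entry boolean presence table scanned in ascending or descending order, so no intermediate list, dictionary or sort is needed.
import Mathlib
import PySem

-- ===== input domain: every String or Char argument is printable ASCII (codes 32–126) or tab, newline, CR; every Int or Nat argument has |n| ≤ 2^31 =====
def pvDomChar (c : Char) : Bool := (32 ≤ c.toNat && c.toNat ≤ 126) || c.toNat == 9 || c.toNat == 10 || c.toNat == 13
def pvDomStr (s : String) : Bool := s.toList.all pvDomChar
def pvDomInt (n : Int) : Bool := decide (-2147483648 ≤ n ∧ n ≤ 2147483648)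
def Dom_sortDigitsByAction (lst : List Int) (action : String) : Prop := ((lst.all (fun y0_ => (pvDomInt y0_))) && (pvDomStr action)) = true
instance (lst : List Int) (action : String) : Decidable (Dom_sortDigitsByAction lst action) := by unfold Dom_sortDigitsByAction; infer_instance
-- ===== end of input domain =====

-- B replaces A's digit list + Counter dedup + comparison sort by a 10-entry boolean
-- presence table scanned in ascending/descending digit order (objective: simpler).

-- ===== PORT A =====
-- inner while loop: `while v > 0: new_list.append(v % 10); v = int(v / 10)`.
-- On the positive v the loop runs with, Python's int(v/10) equals floor division v // 10
-- (exact on |v| ≤ 2^31: the float quotient's rounding error cannot cross an integer).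
def pvDigitLoop (v : Int) (acc : List Int) : List Int :=
  if h : v > 0 then pvDigitLoop (PySem.Int.floordiv v 10) (acc ++ [PySem.Int.mod v 10]) else acc
termination_by v.toNat
decreasing_by
  rw [PySem.Int.floordiv_eq_ediv_of_pos (by norm_num)]
  omega

def sortDigitsByAction (lst : List Int) (action : String) : List Int :=
  -- for v in lst: while v > 0: …
  let new_list := lst.foldl (fun acc v => pvDigitLoop v acc) []
  let d := PySem.Dict.counter new_list
  -- for k, v in d.items(): new_list.append(int(k))   (list was cleared first)
  let new_list2 := d.items.foldl (fun acc kv => acc ++ [kv.1]) []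
  if action == "asc" then PySem.List.sorted new_list2 (fun x => x) false
  else PySem.List.sorted new_list2 (fun x => x) true

-- ===== PORT B =====
-- same while loop, marking present[v % 10] = True instead of appending
def pvMarkLoop (v : Int) (p : List Bool) : List Bool :=
  if h : v > 0 then pvMarkLoop (PySem.Int.floordiv v 10) (p.set (PySem.Int.mod v 10).toNat true) else p
termination_by v.toNat
decreasing_by
  rw [PySem.Int.floordiv_eq_ediv_of_pos (by norm_num)]
  omega

def sortDigitsByAction_alt (lst : List Int) (action : String) : List Int :=
  let present := lst.foldl (fun p v => pvMarkLoop v p) (List.replicate 10 false)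
  -- present[i] for i in range(10): index is always in range of the length-10 list, so getD is exact
  if action == "asc" then (PySem.List.pyRange 0 10 1).filter (fun i => present.getD i.toNat false)
  else (PySem.List.pyRange 9 (-1) (-1)).filter (fun i => present.getD i.toNat false)

-- ===== PRECONDITION & SPEC =====
def Spec_sortDigitsByAction (lst : List Int) (action : String) (out : List Int) : Prop := out = sortDigitsByAction_alt lst action
instance (lst : List Int) (action : String) (out : List Int) : Decidable (Spec_sortDigitsByAction lst action out) := by unfold Spec_sortDigitsByAction; infer_instance

-- ===== CLAIM (what is proved, stated in full; the proofs are below) =====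
def Claim_equal_sortDigitsByAction : Prop := ∀ (lst : List Int) (action : String), Dom_sortDigitsByAction lst action → Spec_sortDigitsByAction lst action (sortDigitsByAction lst action)

-- ===== LEMMAS AND PROOFS =====

-- digit extraction ignores the accumulator
theorem pvDigitLoop_acc (v : Int) (acc : List Int) :
    ∀ a, pvDigitLoop v a = a ++ pvDigitLoop v [] := by
  induction v, acc using pvDigitLoop.induct with
  | case1 v acc h ih =>
      intro a
      conv_lhs => rw [pvDigitLoop, dif_pos h, ih]
      conv_rhs => rw [pvDigitLoop, dif_pos h, ih]
      simp
  | case2 v acc h =>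
      intro a
      conv_lhs => rw [pvDigitLoop, dif_neg h]
      conv_rhs => rw [pvDigitLoop, dif_neg h]
      simp

-- the digits extracted from one number are decimal digits
theorem pvDigitLoop_bounds (v : Int) (acc : List Int) :
    ∀ d ∈ pvDigitLoop v [], 0 ≤ d ∧ d < 10 := by
  induction v, acc using pvDigitLoop.induct with
  | case1 v acc h ih =>
      intro d hd
      rw [pvDigitLoop, dif_pos h, pvDigitLoop_acc _ []] at hd
      rcases List.mem_append.1 hd with hd | hd
      · rw [List.nil_append, List.mem_singleton] at hd
        subst hd
        exact ⟨PySem.Int.mod_nonneg v (by norm_num), PySem.Int.mod_lt v (by norm_num)⟩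
      · exact ih d hd
  | case2 v acc h =>
      intro d hd
      rw [pvDigitLoop, dif_neg h] at hd
      simp at hd

-- B's marking loop is the fold of single marks over A's digit list for one number
theorem pvMarkLoop_eq (v : Int) (acc : List Bool) :
    ∀ p, pvMarkLoop v p = (pvDigitLoop v []).foldl (fun p d => p.set d.toNat true) p := by
  induction v, acc using pvMarkLoop.induct with
  | case1 v acc h ih =>
      intro p
      rw [pvMarkLoop, dif_pos h, ih]
      conv_rhs => rw [pvDigitLoop, dif_pos h, pvDigitLoop_acc _ []]
      simp
  | case2 v acc h =>
      intro p
      rw [pvMarkLoop, dif_neg h]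
      conv_rhs => rw [pvDigitLoop, dif_neg h]
      simp

-- the outer fold of digit extraction ignores the accumulator, too
theorem foldl_digit_acc (lst : List Int) :
    ∀ a, lst.foldl (fun acc v => pvDigitLoop v acc) a = a ++ lst.foldl (fun acc v => pvDigitLoop v acc) [] := by
  induction lst with
  | nil => simp
  | cons v t ih =>
      intro a
      simp only [List.foldl_cons]
      rw [ih, pvDigitLoop_acc v [] a, ih (pvDigitLoop v [])]
      simp

-- B's presence table is A's full digit list folded with single marks
theorem fold_mark_eq (lst : List Int) :
    ∀ p, lst.foldl (fun p v => pvMarkLoop v p) p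
      = (lst.foldl (fun acc v => pvDigitLoop v acc) []).foldl (fun p d => p.set d.toNat true) p := by
  induction lst with
  | nil => simp
  | cons v t ih =>
      intro p
      simp only [List.foldl_cons]
      rw [ih, pvMarkLoop_eq v [], foldl_digit_acc t (pvDigitLoop v []), List.foldl_append]

theorem all_digits_bounds (lst : List Int) :
    ∀ d ∈ lst.foldl (fun acc v => pvDigitLoop v acc) [], 0 ≤ d ∧ d < 10 := by
  induction lst with
  | nil => simp
  | cons v t ih =>
      intro d hd
      simp only [List.foldl_cons] at hd
      rw [foldl_digit_acc] at hd
      rcases List.mem_append.1 hd with hd | hd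
      · exact pvDigitLoop_bounds v [] d hd
      · exact ih d hd

-- reading the presence table after folding the marks
theorem getD_fold_set (ds : List Int) (hb : ∀ d ∈ ds, 0 ≤ d ∧ d < 10) :
    ∀ (p : List Bool), p.length = 10 → ∀ i : Nat, i < 10 →
      ((ds.foldl (fun p d => p.set d.toNat true) p).getD i false
        = (p.getD i false || decide ((i : Int) ∈ ds))) := by
  induction ds with
  | nil => intro p hp i hi; simp
  | cons d t ih =>
      intro p hp i hi
      have hd := hb d (by simp)
      simp only [List.foldl_cons]
      rw [ih (fun x hx => hb x (by simp [hx])) _ (by simp [hp]) i hi]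
      have hset : (p.set d.toNat true).getD i false = (p.getD i false || decide ((i : Int) = d)) := by
        rcases eq_or_ne i d.toNat with h | h
        · subst h
          have h1 : d.toNat < p.length := by omega
          simp [List.getD, List.getElem?_set_self h1]
          omega
        · rw [List.getD, List.getElem?_set_ne (by omega)]
          simp [List.getD]
          omega
      rw [hset]
      simp [Bool.or_assoc]

-- A's second loop just lists the Counter's keys
theorem foldl_append_fst {α β : Type} (l : List (α × β)) :
    ∀ a : List α, l.foldl (fun acc kv => acc ++ [kv.1]) a = a ++ l.map Prod.fst := by
  induction l with
  | nil => simp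
  | cons x t ih => intro a; simp [ih]

-- ascending filter over 0..9 names sorted(set(ds))
theorem sorted_set_asc (ds : List Int) (hb : ∀ d ∈ ds, 0 ≤ d ∧ d < 10) :
    PySem.List.sorted (PySem.Set.ofList ds) (fun x => x) false
      = (PySem.List.pyRange 0 10 1).filter (fun i => decide (i ∈ ds)) := by
  apply PySem.List.sorted_eq_of_perm_of_pairwise_lt
  · rw [(List.perm_ext_iff_of_nodup (List.Nodup.filter _ (PySem.List.nodup_pyRange_one 0 10)) (PySem.Set.nodup_ofList ds))]
    intro a
    simp [List.mem_filter, PySem.Set.mem_ofList, PySem.List.mem_pyRange_one]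
    intro ha
    exact ⟨(hb a ha).1, (hb a ha).2⟩
  · exact List.Pairwise.filter _ (PySem.List.pairwise_lt_pyRange_one 0 10)

-- descending filter over 9..0 names sorted(set(ds), reverse=True)
theorem sorted_set_desc (ds : List Int) (hb : ∀ d ∈ ds, 0 ≤ d ∧ d < 10) :
    PySem.List.sorted (PySem.Set.ofList ds) (fun x => x) true
      = (PySem.List.pyRange 9 (-1) (-1)).filter (fun i => decide (i ∈ ds)) := by
  apply PySem.List.sorted_rev_eq_of_perm_of_pairwise_gt
  · rw [(List.perm_ext_iff_of_nodup (List.Nodup.filter _ (by decide)) (PySem.Set.nodup_ofList ds))]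
    intro a
    have : PySem.List.pyRange 9 (-1) (-1) = [9, 8, 7, 6, 5, 4, 3, 2, 1, 0] := by decide
    simp [List.mem_filter, PySem.Set.mem_ofList, this]
    intro ha
    have := hb a ha
    omega
  · refine List.Pairwise.filter _ ?_
    show (PySem.List.pyRange 9 (-1) (-1)).Pairwise (· > ·)
    decide

-- ===== VERDICT (by name: the statement is the Claim_ definition above) =====
theorem sortDigitsByAction_spec : Claim_equal_sortDigitsByAction := by
  intro lst action _
  unfold Spec_sortDigitsByAction
  dsimp only [sortDigitsByAction, sortDigitsByAction_alt]
  have hb : ∀ d ∈ lst.foldl (fun acc v => pvDigitLoop v acc) [], 0 ≤ d ∧ d < 10 :=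
    all_digits_bounds lst
  have hkeys : (PySem.Dict.counter (lst.foldl (fun acc v => pvDigitLoop v acc) [])).items.foldl
      (fun acc kv => acc ++ [kv.1]) []
      = PySem.Set.ofList (lst.foldl (fun acc v => pvDigitLoop v acc) []) := by
    rw [foldl_append_fst, PySem.Dict.items_counter]
    simp [Function.comp_def]
  have hpres : ∀ i : Int, 0 ≤ i → i < 10 →
      ((lst.foldl (fun p v => pvMarkLoop v p) (List.replicate 10 false)).getD i.toNat false
        = decide (i ∈ lst.foldl (fun acc v => pvDigitLoop v acc) [])) := by
    intro i h0 h10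
    have hz : ∀ m : Nat, (List.replicate 10 false).getD m false = false := by
      intro m
      match m with
      | 0 | 1 | 2 | 3 | 4 | 5 | 6 | 7 | 8 | 9 => rfl
      | (n + 10) => rfl
    rw [fold_mark_eq,
      getD_fold_set _ hb _ (by simp) i.toNat (by omega), Int.toNat_of_nonneg h0, hz]
    simp
  have hfilt : ∀ l : List Int, (∀ i ∈ l, 0 ≤ i ∧ i < 10) →
      l.filter (fun i => (lst.foldl (fun p v => pvMarkLoop v p) (List.replicate 10 false)).getD i.toNat false)
        = l.filter (fun i => decide (i ∈ lst.foldl (fun acc v => pvDigitLoop v acc) [])) := by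
    intro l hl
    apply List.filter_congr
    intro i hi
    exact hpres i (hl i hi).1 (hl i hi).2
  split
  · rw [hkeys, sorted_set_asc _ hb, hfilt]
    intro i hi
    rw [PySem.List.mem_pyRange_one] at hi
    omega
  · rw [hkeys, sorted_set_desc _ hb, hfilt]
    intro i hi
    have h9 : PySem.List.pyRange 9 (-1) (-1) = [9, 8, 7, 6, 5, 4, 3, 2, 1, 0] := by decide
    rw [h9] at hi
    fin_cases hi <;> omega
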